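-- pv_equiv track=rewrite | github.com/hoelzl/clm | src/clm/data_sinks/editscript_data_sink.py | split_on_whitespace
-- ===== SOURCE A (Python) =====
-- def split_on_whitespace(source: str) -> list[str]:
--     result = []
--     current_word = ""
--     collecting_whitespace = False
--     for char in source:
--         if char.isspace():
--             if current_word:
--                 if not collecting_whitespace:
--                     assert (
--                         not current_word.isspace()
--                     ), "Expected non-whitespace in current_word"
--                     result.append(current_word)
--                     current_word = ""
--                     collecting_whitespace = True
--                 current_word += char
--             else:
--                 collecting_whitespace = True
--                 current_word += char
--         else:
--             if current_word:
--                 if collecting_whitespace: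
--                     assert current_word.isspace(), "Expected whitespace in current_word"
--                     result.append(current_word)
--                     current_word = ""
--                     collecting_whitespace = False
--                 current_word += char
--             else:
--                 collecting_whitespace = False
--                 current_word += char
--     if current_word:
--         result.append(current_word)
--     return result
-- ===== SOURCE B (Python) =====
-- def split_on_whitespace(source: str) -> list[str]:
--     result = []
--     i, n = 0, len(source)
--     while i < n:
--         ws = source[i].isspace()
--         j = i + 1
--         while j < n and source[j].isspace() == ws:
--             j += 1
--         result.append(source[i:j])
--         i = j
--     return result
-- ===== Notes on version B (the rewrite author's own statement) =====
-- stated objective: simpler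
-- what changed: Replaced the character-by-character state machine (flags current_word/collecting_whitespace) with a two-pointer run scanner that finds each maximal same-class run and appends it as one slice.
import Mathlib
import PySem

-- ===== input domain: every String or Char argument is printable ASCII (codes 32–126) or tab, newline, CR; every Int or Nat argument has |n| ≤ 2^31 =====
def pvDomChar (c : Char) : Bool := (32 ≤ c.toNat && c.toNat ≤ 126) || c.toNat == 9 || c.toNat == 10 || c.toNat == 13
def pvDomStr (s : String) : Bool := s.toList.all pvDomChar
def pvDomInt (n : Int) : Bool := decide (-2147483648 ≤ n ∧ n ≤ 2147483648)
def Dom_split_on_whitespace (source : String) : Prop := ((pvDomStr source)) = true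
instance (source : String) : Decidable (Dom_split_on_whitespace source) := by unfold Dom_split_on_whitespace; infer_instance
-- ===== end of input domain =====

-- B replaces A's per-character flag state machine by a maximal-run scanner (simpler); same return value.

-- ===== PORT A =====
-- state = (result, current_word as List Char, collecting_whitespace); the two asserts in A
-- always hold (the loop invariant keeps current_word single-class) and are no-ops, so they are omitted.
def pvStepA (st : List String × List Char × Bool) (c : Char) : List String × List Char × Bool :=
  let res := st.1; let cw := st.2.1; let coll := st.2.2
  if PySem.Chars.isspace c then
    if cw ≠ [] then
      if !coll then (res ++ [String.ofList cw], [c], true)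
      else (res, cw ++ [c], coll)
    else (res, [c], true)
  else
    if cw ≠ [] then
      if coll then (res ++ [String.ofList cw], [c], false)
      else (res, cw ++ [c], coll)
    else (res, [c], false)

def split_on_whitespace (source : String) : List String :=
  let st := source.toList.foldl pvStepA ([], [], false)
  if st.2.1 ≠ [] then st.1 ++ [String.ofList st.2.1] else st.1

-- ===== PORT B =====
-- inner while loop of Source B: extend j while the same class; returns (the run scanned, the rest)
def pvSpan (ws : Bool) : List Char → List Char × List Char
  | [] => ([], [])
  | c :: cs =>
    if PySem.Chars.isspace c = ws then
      let p := pvSpan ws cs; (c :: p.1, p.2)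
    else ([], c :: cs)

theorem pvSpan_len (ws : Bool) : ∀ cs : List Char, (pvSpan ws cs).2.length ≤ cs.length := by
  intro cs
  induction cs with
  | nil => simp [pvSpan]
  | cons c cs ih =>
    simp only [pvSpan]
    split
    · exact Nat.le_succ_of_le ih
    · simp

-- outer while loop of Source B: take the maximal run starting at the current position, emit it, continue
def pvGo : List Char → List String
  | [] => []
  | c :: cs =>
    let p := pvSpan (PySem.Chars.isspace c) cs
    String.ofList (c :: p.1) :: pvGo p.2
termination_by cs => cs.length
decreasing_by exact Nat.lt_succ_of_le (pvSpan_len _ _)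

def split_on_whitespace_alt (source : String) : List String :=
  pvGo source.toList

-- ===== PRECONDITION & SPEC =====
def Spec_split_on_whitespace (source : String) (out : List String) : Prop := out = split_on_whitespace_alt source
instance (source : String) (out : List String) : Decidable (Spec_split_on_whitespace source out) := by unfold Spec_split_on_whitespace; infer_instance

-- ===== CLAIM (what is proved, stated in full; the proofs are below) =====
def Claim_equal_split_on_whitespace : Prop := ∀ (source : String), Dom_split_on_whitespace source → Spec_split_on_whitespace source (split_on_whitespace source)

-- ===== LEMMAS AND PROOFS =====

-- B's run scanner with a pending (nonempty, single-class) run prefixed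
def pvGoP (cw : List Char) (coll : Bool) : List Char → List String
  | [] => [String.ofList cw]
  | c :: cs =>
    if PySem.Chars.isspace c = coll then pvGoP (cw ++ [c]) coll cs
    else String.ofList cw :: pvGo (c :: cs)

theorem pvGoP_eq_span : ∀ (cs : List Char) (cw : List Char) (coll : Bool),
    pvGoP cw coll cs
      = String.ofList (cw ++ (pvSpan coll cs).1) :: pvGo (pvSpan coll cs).2 := by
  intro cs
  induction cs with
  | nil => intro cw coll; simp [pvGoP, pvSpan, pvGo]
  | cons c cs ih =>
    intro cw coll
    simp only [pvGoP, pvSpan]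
    by_cases h : PySem.Chars.isspace c = coll
    · simp only [h, if_true, ih]
      simp
    · simp [h]

theorem pvGo_cons (c : Char) (cs : List Char) :
    pvGo (c :: cs) = pvGoP [c] (PySem.Chars.isspace c) cs := by
  rw [pvGoP_eq_span]
  simp [pvGo]

def pvFinish (st : List String × List Char × Bool) : List String :=
  if st.2.1 ≠ [] then st.1 ++ [String.ofList st.2.1] else st.1

theorem pvFold_eq_goP : ∀ (cs : List Char) (res : List String) (cw : List Char) (coll : Bool),
    cw ≠ [] →
    pvFinish (cs.foldl pvStepA (res, cw, coll)) = res ++ pvGoP cw coll cs := by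
  intro cs
  induction cs with
  | nil =>
    intro res cw coll hcw
    simp [pvFinish, pvGoP, hcw]
  | cons c cs ih =>
    intro res cw coll hcw
    simp only [List.foldl_cons]
    by_cases hc : PySem.Chars.isspace c = coll
    · have hstep : pvStepA (res, cw, coll) c = (res, cw ++ [c], coll) := by
        cases coll <;> simp_all [pvStepA]
      rw [hstep, ih res (cw ++ [c]) coll (by simp)]
      simp [pvGoP, hc]
    · have hstep : pvStepA (res, cw, coll) c = (res ++ [String.ofList cw], [c], PySem.Chars.isspace c) := by
        cases coll <;> cases hsp : PySem.Chars.isspace c <;> simp_all [pvStepA]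
      rw [hstep, ih (res ++ [String.ofList cw]) [c] (PySem.Chars.isspace c) (by simp)]
      rw [pvGoP, if_neg hc, pvGo_cons]
      simp

-- ===== VERDICT (by name: the statement is the Claim_ definition above) =====
theorem split_on_whitespace_spec : Claim_equal_split_on_whitespace := by
  intro source _
  unfold Spec_split_on_whitespace split_on_whitespace split_on_whitespace_alt
  cases hs : source.toList with
  | nil => simp [pvGo]
  | cons c cs =>
    show pvFinish ((c :: cs).foldl pvStepA ([], [], false)) = pvGo (c :: cs)
    have hstep : pvStepA ([], [], false) c = ([], [c], PySem.Chars.isspace c) := by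
      cases hsp : PySem.Chars.isspace c <;> simp [pvStepA, hsp]
    rw [List.foldl_cons, hstep, pvFold_eq_goP cs [] [c] (PySem.Chars.isspace c) (by simp),
      pvGo_cons]
    simp
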